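-- pv_equiv track=rewrite | github.com/JuyeolRyu/CodingTest | 백수/카카오/2020카카오인턴/키패드누르기.py | solution
-- ===== SOURCE A (Python) =====
-- from collections import deque
--
-- def solution(numbers, hand):
--     ans = ''
--     grid = [[1, 2, 3], [4, 5, 6], [7, 8, 9], ['*', 0, '#']]
--     left_start = [3, 0]
--     right_start = [3, 2]
--
--     def bfs(row, col, target):
--         visited = [[False for _ in range(3)] for i in range(4)]
--         queue = deque()
--         queue.append([row, col])
--         visited[row][col] = True
--         cnt = 0
--         while queue:
--             tmp_queue = deque()
--
--             while queue:
--                 c_row, c_col = queue.popleft()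
--                 if grid[c_row][c_col] == target:
--                     return cnt,[c_row,c_col]
--
--                 d_row = [-1, 1, 0, 0]
--                 d_col = [0, 0, -1, 1]
--
--                 for i in range(4):
--                     n_row = c_row + d_row[i]
--                     n_col = c_col + d_col[i]
--                     if 0 <= n_row < 4 and 0 <= n_col < 3 and not visited[n_row][n_col]:
--                         tmp_queue.append([n_row, n_col])
--
--             queue = tmp_queue
--             cnt += 1
--
--     for number in numbers:
--         if number in [1,4,7]:
--             ans += 'L'
--             left_start = [number//3,0]
--         elif number in [3,6,9]:
--             ans += 'R'
--             right_start = [number//3-1,2]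
--         else:
--             left,tmp_left = bfs(left_start[0],left_start[1],number)
--             right,tmp_right = bfs(right_start[0],right_start[1],number)
--
--             if left > right:
--                 ans += 'R'
--                 right_start = tmp_right
--             elif left < right:
--                 ans += 'L'
--                 left_start = tmp_left
--             elif left == right:
--                 if hand == 'left':
--                     ans += 'L'
--                     left_start = tmp_left
--                 else:
--                     ans += 'R'
--                     right_start = tmp_right
--
--     return ans
-- ===== SOURCE B (Python) =====
-- def solution(numbers, hand):
--     # Nearest-hand keypad simulation via a position table and Manhattan distance
--     # (the keypad has no obstacles, so BFS distance = |dr| + |dc|).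
--     pos = {1: (0, 0), 2: (0, 1), 3: (0, 2),
--            4: (1, 0), 5: (1, 1), 6: (1, 2),
--            7: (2, 0), 8: (2, 1), 9: (2, 2),
--            0: (3, 1)}
--     left, right = (3, 0), (3, 2)
--     ans = ''
--     for n in numbers:
--         if n in (1, 4, 7):
--             ans += 'L'
--             left = pos[n]
--         elif n in (3, 6, 9):
--             ans += 'R'
--             right = pos[n]
--         else:
--             t = pos[n]
--             dl = abs(left[0] - t[0]) + abs(left[1] - t[1])
--             dr = abs(right[0] - t[0]) + abs(right[1] - t[1])
--             if dl > dr or (dl == dr and hand != 'left'):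
--                 ans += 'R'
--                 right = t
--             else:
--                 ans += 'L'
--                 left = t
--     return ans
-- ===== Notes on version B (the rewrite author's own statement) =====
-- stated objective: simpler
-- what changed: Replaces the layered BFS search over the keypad grid with a digit->(row,col) position table and a direct Manhattan-distance computation for the middle-column digits.
-- outside the precondition, e.g. on solution([11], 'right'): A does not finish within the time limit, B raises KeyError
import Mathlib
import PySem

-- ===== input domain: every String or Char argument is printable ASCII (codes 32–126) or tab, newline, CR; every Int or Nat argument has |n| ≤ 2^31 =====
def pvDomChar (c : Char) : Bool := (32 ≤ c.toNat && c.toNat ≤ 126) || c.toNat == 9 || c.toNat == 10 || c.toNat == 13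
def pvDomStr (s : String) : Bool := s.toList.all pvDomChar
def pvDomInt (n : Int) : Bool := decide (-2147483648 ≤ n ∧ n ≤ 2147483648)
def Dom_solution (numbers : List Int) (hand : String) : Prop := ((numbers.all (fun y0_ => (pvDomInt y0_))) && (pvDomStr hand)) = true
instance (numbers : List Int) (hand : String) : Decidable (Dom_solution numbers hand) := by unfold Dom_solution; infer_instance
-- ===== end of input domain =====

-- B changes the algorithm: a digit→coordinate table plus Manhattan distance replaces A's
-- layered BFS over the keypad grid (the grid is obstacle-free, so the distances coincide).

-- ===== PORT A =====
-- grid: '*' and '#' are non-int cells; they never compare equal to an int target, so Option Int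
-- with none for them is exact.
def pvGridA : List (List (Option Int)) :=
  [[some 1, some 2, some 3], [some 4, some 5, some 6], [some 7, some 8, some 9],
   [none, some 0, none]]

-- grid[r][c]; indices reached in bfs are always in range (start is in range under Pre_,
-- neighbours are bounds-checked before enqueueing), so the none fall-through is unreachable.
def pvGridAt (r c : Int) : Option Int :=
  match PySem.List.pyGet? pvGridA r with
  | some row => (PySem.List.pyGet? row c).join
  | none => none

def pvVisitedAt (visited : List (List Bool)) (r c : Int) : Bool :=
  match PySem.List.pyGet? visited r with
  | some row => (PySem.List.pyGet? row c).getD false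
  | none => false

-- inner `while queue:` loop: pop from the front, return the found cell, or collect the
-- bounds-checked unvisited neighbours (in the d_row/d_col order) into tmp_queue.
def pvBfsScan (target : Int) (visited : List (List Bool)) :
    List (Int × Int) → List (Int × Int) → (Int × Int) ⊕ List (Int × Int)
  | [], tmp => Sum.inr tmp
  | (r, c) :: rest, tmp =>
    if pvGridAt r c = some target then Sum.inl (r, c)
    else
      let nbrs := ([((-1 : Int), (0 : Int)), (1, 0), (0, -1), (0, 1)]).filterMap
        (fun d =>
          let nr := r + d.1
          let nc := c + d.2
          if 0 ≤ nr ∧ nr < 4 ∧ 0 ≤ nc ∧ nc < 3 ∧ ¬ pvVisitedAt visited nr nc = true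
          then some (nr, nc) else none)
      pvBfsScan target visited rest (tmp ++ nbrs)

-- outer `while queue:` loop with cnt; fuel only bounds the number of layers (any target that
-- is actually on the keypad is found within 6 layers, so fuel 10 never runs out under Pre_).
def pvBfsLoop (target : Int) (visited : List (List Bool)) :
    Nat → List (Int × Int) → Int → Option (Int × (Int × Int))
  | 0, _, _ => none
  | _ + 1, [], _ => none
  | fuel + 1, q@(_ :: _), cnt =>
    match pvBfsScan target visited q [] with
    | Sum.inl p => some (cnt, p)
    | Sum.inr tmp => pvBfsLoop target visited fuel tmp (cnt + 1)

-- visited: all-False 4×3 matrix with only the start cell set True (Python never updates it).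
def pvBfs (row col : Int) (target : Int) : Option (Int × (Int × Int)) :=
  let visited := (List.range 4).map (fun i => (List.range 3).map
    (fun j => decide ((i : Int) = row ∧ (j : Int) = col)))
  pvBfsLoop target visited 10 [(row, col)] 0

-- one iteration of A's `for number in numbers:` loop; the bfs-returns-none branch is
-- unreachable under Pre_ (in Python the bfs would not return there).
def pvStepA (hand : String) (s : String × (Int × Int) × (Int × Int)) (number : Int) :
    String × (Int × Int) × (Int × Int) :=
  let (ans, L, R) := s
  if number = 1 ∨ number = 4 ∨ number = 7 then
    (ans ++ "L", (PySem.Int.floordiv number 3, 0), R)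
  else if number = 3 ∨ number = 6 ∨ number = 9 then
    (ans ++ "R", L, (PySem.Int.floordiv number 3 - 1, 2))
  else
    match pvBfs L.1 L.2 number, pvBfs R.1 R.2 number with
    | some (dl, tl), some (dr, tr) =>
      if dl > dr then (ans ++ "R", L, tr)
      else if dl < dr then (ans ++ "L", tl, R)
      else if hand = "left" then (ans ++ "L", tl, R)
      else (ans ++ "R", L, tr)
    | _, _ => (ans, L, R)

def solution (numbers : List Int) (hand : String) : String :=
  (numbers.foldl (pvStepA hand) ("", (3, 0), (3, 2))).1

-- ===== PORT B =====
-- the pos dict; under Pre_ every looked-up key is present, so the (0,0) default of getD is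
-- unreachable (in Python a missing key would raise KeyError, excluded by Pre_).
def pvPosB : PySem.Dict Int (Int × Int) :=
  PySem.Dict.ofList
    ([(1, (0, 0)), (2, (0, 1)), (3, (0, 2)), (4, (1, 0)), (5, (1, 1)), (6, (1, 2)),
      (7, (2, 0)), (8, (2, 1)), (9, (2, 2)), (0, (3, 1))] : List (Int × (Int × Int)))

def pvStepB (hand : String) (s : String × (Int × Int) × (Int × Int)) (n : Int) :
    String × (Int × Int) × (Int × Int) :=
  let (ans, L, R) := s
  if n = 1 ∨ n = 4 ∨ n = 7 then
    (ans ++ "L", (PySem.Dict.get? pvPosB n).getD (0, 0), R)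
  else if n = 3 ∨ n = 6 ∨ n = 9 then
    (ans ++ "R", L, (PySem.Dict.get? pvPosB n).getD (0, 0))
  else
    let t := (PySem.Dict.get? pvPosB n).getD (0, 0)
    let dl := |L.1 - t.1| + |L.2 - t.2|
    let dr := |R.1 - t.1| + |R.2 - t.2|
    if dl > dr ∨ (dl = dr ∧ ¬ hand = "left") then (ans ++ "R", L, t)
    else (ans ++ "L", t, R)

def solution_alt (numbers : List Int) (hand : String) : String :=
  (numbers.foldl (pvStepB hand) ("", (3, 0), (3, 2))).1

-- ===== PRECONDITION & SPEC =====
-- Pre_ excludes numbers outside 0..9: on those A's bfs loops forever (never returns).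
def Pre_solution (numbers : List Int) (hand : String) : Prop :=
  ∀ n ∈ numbers, 0 ≤ n ∧ n ≤ 9
instance (numbers : List Int) (hand : String) : Decidable (Pre_solution numbers hand) := by
  unfold Pre_solution; infer_instance

def pvWitness_solution : List Int × String := ([1, 3, 4, 5, 8, 2, 1, 4, 5, 9, 5], "right")

def Spec_solution (numbers : List Int) (hand : String) (out : String) : Prop := out = solution_alt numbers hand
instance (numbers : List Int) (hand : String) (out : String) : Decidable (Spec_solution numbers hand out) := by unfold Spec_solution; infer_instance

-- ===== CLAIM (what is proved, stated in full; the proofs are below) =====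
def Claim_equal_solution : Prop := ∀ (numbers : List Int) (hand : String), Dom_solution numbers hand → Pre_solution numbers hand → Spec_solution numbers hand (solution numbers hand)

-- ===== LEMMAS AND PROOFS =====

-- the cells a hand position can ever occupy
def pvCells : List (Int × Int) :=
  [(3, 0), (3, 2), (0, 0), (1, 0), (2, 0), (0, 2), (1, 2), (2, 2),
   (0, 1), (1, 1), (2, 1), (3, 1)]

-- A's bfs from any reachable cell to any middle-column digit returns exactly the Manhattan
-- distance to that digit's coordinate, and that coordinate (finite check: 12 starts x 4 targets).
theorem pvBfs_char : ∀ p ∈ pvCells, ∀ tp ∈ [((0 : Int), ((3 : Int), (1 : Int))), (2, (0, 1)), (5, (1, 1)), (8, (2, 1))],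
    pvBfs p.1 p.2 tp.1 = some (|p.1 - tp.2.1| + |p.2 - tp.2.2|, tp.2) := by decide

-- A's three-way compare/tie-break equals B's single condition (pure branch logic).
theorem pvBranch_eq (hand ans : String) (L R t : Int × Int) (dl dr : Int) :
    (if dl > dr then (ans ++ "R", L, t)
     else if dl < dr then (ans ++ "L", t, R)
     else if hand = "left" then (ans ++ "L", t, R)
     else (ans ++ "R", L, t)) =
    (if dl > dr ∨ (dl = dr ∧ ¬ hand = "left") then (ans ++ "R", L, t)
     else (ans ++ "L", t, R)) := by
  by_cases h1 : dl > dr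
  · simp [h1]
  · by_cases h2 : dl < dr
    · simp [h1, h2]
      intro h; omega
    · have he : dl = dr := by omega
      by_cases h3 : hand = "left"
      · simp [h1, h2, h3]
      · simp [h3, he]

theorem pvStep_eq (hand : String) (ans : String) (L R : Int × Int)
    (hL : L ∈ pvCells) (hR : R ∈ pvCells) (n : Int) (hn : 0 ≤ n ∧ n ≤ 9) :
    pvStepA hand (ans, L, R) n = pvStepB hand (ans, L, R) n ∧
      (pvStepB hand (ans, L, R) n).2.1 ∈ pvCells ∧
      (pvStepB hand (ans, L, R) n).2.2 ∈ pvCells := by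
  have hside : ∀ m : Int, ∀ t : Int × Int, t ∈ pvCells →
      ¬ (m = 1 ∨ m = 4 ∨ m = 7) → ¬ (m = 3 ∨ m = 6 ∨ m = 9) →
      (PySem.Dict.get? pvPosB m).getD (0, 0) = t →
      pvBfs L.1 L.2 m = some (|L.1 - t.1| + |L.2 - t.2|, t) →
      pvBfs R.1 R.2 m = some (|R.1 - t.1| + |R.2 - t.2|, t) →
      pvStepA hand (ans, L, R) m = pvStepB hand (ans, L, R) m ∧
        (pvStepB hand (ans, L, R) m).2.1 ∈ pvCells ∧
        (pvStepB hand (ans, L, R) m).2.2 ∈ pvCells := by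
    intro m t htc hm1 hm2 hget hbL hbR
    constructor
    · simp only [pvStepA, pvStepB, if_neg hm1, if_neg hm2, hbL, hbR, hget]
      exact pvBranch_eq hand ans L R t _ _
    · simp only [pvStepB, if_neg hm1, if_neg hm2, hget]
      split_ifs <;> exact ⟨by assumption, by assumption⟩
  have hnv : n = 0 ∨ n = 1 ∨ n = 2 ∨ n = 3 ∨ n = 4 ∨ n = 5 ∨ n = 6 ∨ n = 7 ∨ n = 8 ∨ n = 9 := by omega
  rcases hnv with h | h | h | h | h | h | h | h | h | h <;> subst h
  · exact hside 0 (3, 1) (by decide) (by decide) (by decide) (by decide) (pvBfs_char L hL (0, (3, 1)) (by decide)) (pvBfs_char R hR (0, (3, 1)) (by decide))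
  · refine ⟨?_, by simp [pvStepB]; decide, by simp [pvStepB]; exact hR⟩
    simp only [pvStepA, pvStepB]; norm_num; decide
  · exact hside 2 (0, 1) (by decide) (by decide) (by decide) (by decide) (pvBfs_char L hL (2, (0, 1)) (by decide)) (pvBfs_char R hR (2, (0, 1)) (by decide))
  · refine ⟨?_, by simp [pvStepB]; exact hL, by simp [pvStepB]; decide⟩
    simp only [pvStepA, pvStepB]; norm_num; decide
  · refine ⟨?_, by simp [pvStepB]; decide, by simp [pvStepB]; exact hR⟩
    simp only [pvStepA, pvStepB]; norm_num; decide
  · exact hside 5 (1, 1) (by decide) (by decide) (by decide) (by decide) (pvBfs_char L hL (5, (1, 1)) (by decide)) (pvBfs_char R hR (5, (1, 1)) (by decide))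
  · refine ⟨?_, by simp [pvStepB]; exact hL, by simp [pvStepB]; decide⟩
    simp only [pvStepA, pvStepB]; norm_num; decide
  · refine ⟨?_, by simp [pvStepB]; decide, by simp [pvStepB]; exact hR⟩
    simp only [pvStepA, pvStepB]; norm_num; decide
  · exact hside 8 (2, 1) (by decide) (by decide) (by decide) (by decide) (pvBfs_char L hL (8, (2, 1)) (by decide)) (pvBfs_char R hR (8, (2, 1)) (by decide))
  · refine ⟨?_, by simp [pvStepB]; exact hL, by simp [pvStepB]; decide⟩
    simp only [pvStepA, pvStepB]; norm_num; decide

theorem pvFold_eq (hand : String) (numbers : List Int)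
    (hpre : ∀ n ∈ numbers, 0 ≤ n ∧ n ≤ 9) :
    ∀ (ans : String) (L R : Int × Int), L ∈ pvCells → R ∈ pvCells →
      numbers.foldl (pvStepA hand) (ans, L, R) =
        numbers.foldl (pvStepB hand) (ans, L, R) := by
  induction numbers with
  | nil => intro _ _ _ _ _; rfl
  | cons n rest ih =>
    intro ans L R hL hR
    obtain ⟨heq, hL', hR'⟩ := pvStep_eq hand ans L R hL hR n (hpre n (by simp))
    simp only [List.foldl_cons, heq]
    rcases hstep : pvStepB hand (ans, L, R) n with ⟨a', L', R'⟩
    rw [hstep] at hL' hR'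
    exact ih (fun m hm => hpre m (by simp [hm])) a' L' R' hL' hR'

-- ===== VERDICT (by name: the statement is the Claim_ definition above) =====
theorem solution_spec : Claim_equal_solution := by
  intro numbers hand _ hpre
  unfold Spec_solution solution solution_alt
  rw [pvFold_eq hand numbers hpre "" (3, 0) (3, 2) (by decide) (by decide)]
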